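-- pv_equiv track=rewrite | github.com/AkshathaHegde102/Scrabblescores | Scrabblescore.py | wordcomp
-- ===== SOURCE A (Python) =====
-- def wordcomp(word, r):
--     ''' Checks if word can be made with rack '''
--     if len(word) == 0 :
--         return True
--     elif word[0] in r :
--         r.remove(word[0])
--         return wordcomp(word[1:], r)
--     else :
--         return False
-- ===== SOURCE B (Python) =====
-- def wordcomp(word, r):
--     ''' Checks if word can be made with rack '''
--     # Counter-based: one pass over the rack, one pass over the word.
--     # NOTE: unlike A, B does not mutate r; equivalence is about the return value.
--     have = {}
--     for s in r:
--         have[s] = have.get(s, 0) + 1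
--     for ch in word:
--         n = have.get(ch, 0)
--         if n == 0:
--             return False
--         have[ch] = n - 1
--     return True
-- ===== Notes on version B (the rewrite author's own statement) =====
-- stated objective: faster
-- what changed: Replaces the recursive scan-and-remove over the rack list (list membership + list.remove per letter, plus word slicing) with a single dict counter built once over the rack and a one-pass decrement loop over the word; B does not mutate r (return value equivalence).
import Mathlib
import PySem

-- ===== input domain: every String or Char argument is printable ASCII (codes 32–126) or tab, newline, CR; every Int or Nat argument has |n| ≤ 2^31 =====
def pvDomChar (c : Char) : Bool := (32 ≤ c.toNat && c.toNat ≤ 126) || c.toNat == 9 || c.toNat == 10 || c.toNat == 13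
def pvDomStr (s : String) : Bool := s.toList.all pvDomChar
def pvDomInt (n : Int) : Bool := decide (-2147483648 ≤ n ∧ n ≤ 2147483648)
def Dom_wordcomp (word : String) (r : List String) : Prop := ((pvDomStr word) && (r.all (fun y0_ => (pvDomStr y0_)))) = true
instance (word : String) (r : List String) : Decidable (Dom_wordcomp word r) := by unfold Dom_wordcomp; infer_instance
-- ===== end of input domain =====

-- B replaces A's recursive scan-and-remove over the rack with a counter dict built once
-- and a one-pass decrement loop (faster in a timing run). A mutates r in place; B does
-- not — the equivalence proved here is about the RETURN value only.

-- ===== PORT A =====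
-- A recurses on the word: if word[0] in r, remove it (first occurrence) and recurse on word[1:].
def wordcompGoA : List Char → List String → Bool
  | [], _ => true
  | c :: rest, r =>
    if String.mk [c] ∈ r then
      match PySem.List.remove? r (String.mk [c]) with
      | some r' => wordcompGoA rest r'
      | none => false   -- unreachable: membership was just checked
    else false

def wordcomp (word : String) (r : List String) : Bool :=
  wordcompGoA word.toList r

-- ===== PORT B =====
-- B's word loop: look up the count, fail on 0, else decrement.
def wordcompGoB : List Char → PySem.Dict String Int → Bool
  | [], _ => true
  | c :: rest, hv =>
    let n := hv.getD (String.mk [c]) 0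
    if n = 0 then false
    else wordcompGoB rest (hv.insert (String.mk [c]) (n - 1))

def wordcomp_alt (word : String) (r : List String) : Bool :=
  let hv := r.foldl (fun d s => d.insert s (d.getD s 0 + 1)) PySem.Dict.empty
  wordcompGoB word.toList hv

-- ===== PRECONDITION & SPEC =====
def Spec_wordcomp (word : String) (r : List String) (out : Bool) : Prop := out = wordcomp_alt word r
instance (word : String) (r : List String) (out : Bool) : Decidable (Spec_wordcomp word r out) := by unfold Spec_wordcomp; infer_instance

-- ===== CLAIM (what is proved, stated in full; the proofs are below) =====
def Claim_equal_wordcomp : Prop := ∀ (word : String) (r : List String), Dom_wordcomp word r → Spec_wordcomp word r (wordcomp word r)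

-- ===== LEMMAS AND PROOFS =====

-- Invariant: B's loop run on any dict whose counts agree with the rack list equals A's recursion.
theorem goB_eq_goA (chars : List Char) :
    ∀ (r : List String) (d : PySem.Dict String Int),
      (∀ s : String, d.getD s 0 = (r.count s : Int)) →
      wordcompGoB chars d = wordcompGoA chars r := by
  induction chars with
  | nil => intro r d _; rfl
  | cons c rest ih =>
    intro r d hinv
    simp only [wordcompGoB, wordcompGoA]
    by_cases hmem : String.mk [c] ∈ r
    · have hcnt : 0 < r.count (String.mk [c]) := List.count_pos_iff.mpr hmem
      have hn : d.getD (String.mk [c]) 0 ≠ 0 := by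
        rw [hinv]; omega
      rw [if_neg hn, if_pos hmem, PySem.List.remove?_eq_some_erase r (String.mk [c]) hmem]
      apply ih
      intro t
      rw [PySem.Dict.getD_insert]
      by_cases ht : t = String.mk [c]
      · subst ht
        rw [if_pos rfl, hinv, List.count_erase_self]
        omega
      · rw [if_neg ht, hinv, List.count_erase_of_ne ht]
    · have hcnt : r.count (String.mk [c]) = 0 := List.count_eq_zero.mpr hmem
      have hn : d.getD (String.mk [c]) 0 = 0 := by rw [hinv, hcnt]; rfl
      rw [if_pos hn, if_neg hmem]

-- ===== VERDICT (by name: the statement is the Claim_ definition above) =====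
theorem wordcomp_spec : Claim_equal_wordcomp := by
  intro word r _
  unfold Spec_wordcomp wordcomp wordcomp_alt
  rw [PySem.Dict.foldl_insert_getD_add_one_eq_counter]
  exact (goB_eq_goA word.toList r (PySem.Dict.counter r)
    (fun s => PySem.Dict.getD_counter r s)).symm
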